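-- pv_equiv track=rewrite | github.com/zffgithub/superflore | superflore/generators/bitbake/yocto_recipe.py | convert_dep_except_oe_vars
-- ===== SOURCE A (Python) =====
-- def convert_dep_except_oe_vars(dep):
--     """
--     Convert dependency name to lowercase and replace '_' by '-'
--     except in ${OE} variables.
--     """
--     BEGIN_PATTERN = '${'
--     END_PATTERN = '}'
--     result = ''
--     begin = dep.find(BEGIN_PATTERN)
--     while begin != -1:
--         result += dep[:begin].lower().replace('_', '-')
--         remaining = dep[begin + len(BEGIN_PATTERN):]
--         end = remaining.find(END_PATTERN)
--         if end == -1: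
--             dep = dep[begin:]
--             break
--         oe_var = remaining[:end]
--         result += BEGIN_PATTERN + oe_var + END_PATTERN
--         dep = remaining[end + len(END_PATTERN):]
--         begin = dep.find(BEGIN_PATTERN)
--     result += dep.lower().replace('_', '-')
--     return result
-- ===== SOURCE B (Python) =====
-- import re
--
--
-- def convert_dep_except_oe_vars(dep):
--     """
--     Convert dependency name to lowercase and replace '_' by '-'
--     except in ${OE} variables.
--     """
--     parts = re.split(r'(\$\{[^}]*\})', dep)
--     return ''.join(p if i % 2 else p.lower().replace('_', '-')
--                    for i, p in enumerate(parts))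
-- ===== Notes on version B (the rewrite author's own statement) =====
-- stated objective: idiomatic
-- what changed: B tokenizes the string once with re.split on a capturing ${...} group and joins the segments by index parity (even segments lowercased/dashed, odd ${...} tokens kept), instead of A's manual find/slice/accumulate while-loop.
import Mathlib
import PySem

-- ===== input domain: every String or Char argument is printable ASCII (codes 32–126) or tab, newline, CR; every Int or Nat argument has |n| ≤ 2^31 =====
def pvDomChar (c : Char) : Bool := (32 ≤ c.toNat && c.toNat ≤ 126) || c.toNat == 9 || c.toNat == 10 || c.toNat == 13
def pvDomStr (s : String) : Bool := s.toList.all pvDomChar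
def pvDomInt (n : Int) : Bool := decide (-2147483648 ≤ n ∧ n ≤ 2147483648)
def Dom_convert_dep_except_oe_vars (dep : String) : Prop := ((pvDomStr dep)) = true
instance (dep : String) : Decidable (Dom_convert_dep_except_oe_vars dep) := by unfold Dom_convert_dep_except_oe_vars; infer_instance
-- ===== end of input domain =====

-- B re-implements A idiomatically: tokenize once into alternating outside/${...} segments (re.split with a
-- capturing group) and join the segments by index parity, instead of A's manual find/slice accumulator loop.

-- shared helper: s.lower().replace('_', '-') (both Pythons apply exactly this expression to outside text)
def pvTr (xs : List Char) : List Char :=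
  PySem.Chars.replace (PySem.Chars.lower xs) ['_'] ['-']

-- termination helper for both recursions: each iteration consumes the prefix through the first '${…}'
lemma pvShrink (dep : List Char) (hb : ¬ PySem.Chars.find dep ['$', '{'] = -1)
    (he : ¬ PySem.Chars.find (PySem.List.slice dep (some (PySem.Chars.find dep ['$', '{'] + 2)) none) ['}'] = -1) :
    (PySem.List.slice (PySem.List.slice dep (some (PySem.Chars.find dep ['$', '{'] + 2)) none)
      (some (PySem.Chars.find (PySem.List.slice dep (some (PySem.Chars.find dep ['$', '{'] + 2)) none) ['}'] + 1))
      none).length < dep.length := by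
  have hb0 : 0 ≤ PySem.Chars.find dep ['$', '{'] := by
    have := PySem.Chars.neg_one_le_find dep ['$', '{']; omega
  have hinf : (['$', '{'] : List Char) <:+: dep := by
    rw [← PySem.Chars.find_ne_neg_one_iff]; exact hb
  have hlen : 2 ≤ dep.length := hinf.length_le
  set b := PySem.Chars.find dep ['$', '{'] with hbdef
  set rem := PySem.List.slice dep (some (b + 2)) none with hrdef
  have he0 : 0 ≤ PySem.Chars.find rem ['}'] := by
    have := PySem.Chars.neg_one_le_find rem ['}']; omega
  set e := PySem.Chars.find rem ['}'] with hedef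
  have hb' : b + 2 = ((b.toNat + 2 : Nat) : Int) := by omega
  have he' : e + 1 = ((e.toNat + 1 : Nat) : Int) := by omega
  have hrem : rem = dep.drop (b.toNat + 2) := by
    rw [hrdef, hb', PySem.List.slice_from_natCast]
  have : PySem.List.slice rem (some (e + 1)) none = rem.drop (e.toNat + 1) := by
    rw [he', PySem.List.slice_from_natCast]
  rw [this, hrem]
  simp only [List.length_drop]
  omega

-- ===== PORT A =====
def pvLoopA (dep result : List Char) : List Char :=
  -- while begin != -1: …  (begin/end via str.find; slices via PySem.List.slice)
  let b := PySem.Chars.find dep ['$', '{']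
  if hb : b = -1 then
    result ++ pvTr dep                                     -- loop exits; result += dep.lower().replace('_','-')
  else
    let result1 := result ++ pvTr (PySem.List.slice dep none (some b))   -- result += dep[:begin].lower().replace…
    let remaining := PySem.List.slice dep (some (b + 2)) none            -- dep[begin+2:]
    let e := PySem.Chars.find remaining ['}']
    if he : e = -1 then
      result1 ++ pvTr (PySem.List.slice dep (some b) none)               -- dep = dep[begin:]; break; result += …
    else
      pvLoopA (PySem.List.slice remaining (some (e + 1)) none)
        (result1 ++ ['$', '{'] ++ PySem.List.slice remaining none (some e) ++ ['}'])
termination_by dep.length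
decreasing_by exact pvShrink dep hb he

def convert_dep_except_oe_vars (dep : String) : String :=
  String.ofList (pvLoopA dep.toList [])

-- ===== PORT B =====
-- hand port of re.split(r'(\$\{[^}]*\})', dep): exact, because the regex can only match at the FIRST '${'
-- (a match must start with '${', and if no '}' follows the first '${' none follows any later one), and
-- [^}]* makes it end at the first '}' after it; segments alternate outside-text / captured '${…}' token.
def pvTokenize (s : List Char) : List (List Char) :=
  let b := PySem.Chars.find s ['$', '{']
  if hb : b = -1 then [s]
  else
    let remaining := PySem.List.slice s (some (b + 2)) none
    let e := PySem.Chars.find remaining ['}']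
    if he : e = -1 then [s]
    else
      PySem.List.slice s none (some b) ::
        (['$', '{'] ++ PySem.List.slice remaining none (some e) ++ ['}']) ::
        pvTokenize (PySem.List.slice remaining (some (e + 1)) none)
termination_by s.length
decreasing_by exact pvShrink s hb he

def convert_dep_except_oe_vars_alt (dep : String) : String :=
  -- ''.join(p if i % 2 else p.lower().replace('_','-') for i, p in enumerate(parts))
  String.ofList (((PySem.List.enumerate (pvTokenize dep.toList)).map
    (fun p => if p.1 % 2 ≠ 0 then p.2 else pvTr p.2)).flatten)

-- ===== PRECONDITION & SPEC =====
def Spec_convert_dep_except_oe_vars (dep : String) (out : String) : Prop := out = convert_dep_except_oe_vars_alt dep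
instance (dep : String) (out : String) : Decidable (Spec_convert_dep_except_oe_vars dep out) := by unfold Spec_convert_dep_except_oe_vars; infer_instance

-- ===== CLAIM (what is proved, stated in full; the proofs are below) =====
def Claim_equal_convert_dep_except_oe_vars : Prop := ∀ (dep : String), Dom_convert_dep_except_oe_vars dep → Spec_convert_dep_except_oe_vars dep (convert_dep_except_oe_vars dep)

-- ===== LEMMAS AND PROOFS =====

lemma pvGo_underscore : ∀ (fuel : Nat) (l acc : List Char), l.length ≤ fuel →
    PySem.Chars.replace.go ['_'] ['-'] fuel l acc
      = acc.reverse ++ l.map (fun c => if c = '_' then '-' else c) := by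
  intro fuel
  induction fuel with
  | zero =>
    intro l acc h
    have : l = [] := List.eq_nil_of_length_eq_zero (by omega)
    subst this; simp [PySem.Chars.replace.go]
  | succ n ih =>
    intro l acc h
    cases l with
    | nil => simp [PySem.Chars.replace.go]
    | cons c t =>
      by_cases hc : c = '_'
      · subst hc
        have hp : (['_'] : List Char).isPrefixOf ('_' :: t) = true := by simp [List.isPrefixOf]
        simp only [PySem.Chars.replace.go, hp, if_true]
        rw [ih _ _ (by simpa using Nat.le_of_succ_le_succ h)]
        simp
      · have hp : (['_'] : List Char).isPrefixOf (c :: t) = false := by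
          simp only [List.isPrefixOf, Bool.and_true]
          exact decide_eq_false (fun hh => hc hh.symm)
        simp only [PySem.Chars.replace.go, hp, Bool.false_eq_true, if_false]
        rw [ih _ _ (by simpa using Nat.le_of_succ_le_succ h)]
        simp [hc]

lemma pvTr_map (xs : List Char) :
    pvTr xs = xs.map (fun c =>
      if PySem.Chars.lowerChar c = '_' then '-' else PySem.Chars.lowerChar c) := by
  unfold pvTr
  rw [PySem.Chars.replace]
  simp only [List.isEmpty_cons, if_false, Bool.false_eq_true]
  rw [PySem.Chars.lower, pvGo_underscore (xs.map PySem.Chars.lowerChar).length _ _ le_rfl]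
  simp [List.map_map, Function.comp_def]

lemma pvTr_append (a b : List Char) : pvTr (a ++ b) = pvTr a ++ pvTr b := by
  simp [pvTr_map]

lemma pvSlice_split (xs : List Char) (b : Int) (hb : 0 ≤ b) :
    PySem.List.slice xs none (some b) ++ PySem.List.slice xs (some b) none = xs := by
  have : b = ((b.toNat : Nat) : Int) := by omega
  rw [this, PySem.List.slice_to_natCast, PySem.List.slice_from_natCast, List.take_append_drop]

-- B's join, as a function of the token list
def pvR (ts : List (List Char)) : List Char :=
  ((PySem.List.enumerate ts).map (fun p => if p.1 % 2 ≠ 0 then p.2 else pvTr p.2)).flatten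

lemma pvR_shift : ∀ (ts : List (List Char)) (s : Int),
    ((PySem.List.enumerate ts (s + 2)).map (fun p => if p.1 % 2 ≠ 0 then p.2 else pvTr p.2)).flatten
      = ((PySem.List.enumerate ts s).map (fun p => if p.1 % 2 ≠ 0 then p.2 else pvTr p.2)).flatten := by
  intro ts
  induction ts with
  | nil => intro s; simp [PySem.List.enumerate_nil]
  | cons x xs ih =>
    intro s
    rw [PySem.List.enumerate_cons, PySem.List.enumerate_cons]
    simp only [List.map_cons, List.flatten_cons]
    have hmod : (s + 2) % 2 = s % 2 := by omega
    have harg : s + 2 + 1 = (s + 1) + 2 := by ring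
    rw [hmod, harg, ih (s + 1)]

lemma pvR_single (t : List Char) : pvR [t] = pvTr t := by
  simp [pvR, PySem.List.enumerate_cons, PySem.List.enumerate_nil]

lemma pvR_cons2 (t0 t1 : List Char) (ts : List (List Char)) :
    pvR (t0 :: t1 :: ts) = pvTr t0 ++ (t1 ++ pvR ts) := by
  unfold pvR
  rw [PySem.List.enumerate_cons, PySem.List.enumerate_cons]
  simp only [List.map_cons, List.flatten_cons]
  rw [if_neg (by norm_num), if_pos (by norm_num)]
  have h01 : (0 : Int) + 1 + 1 = 0 + 2 := by ring
  rw [h01, pvR_shift ts 0]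

lemma pvLoopA_eq (dep res : List Char) : pvLoopA dep res = res ++ pvR (pvTokenize dep) := by
  fun_induction pvLoopA dep res with
  | case1 dep res b hb =>
    replace hb : PySem.Chars.find dep ['$', '{'] = -1 := hb
    rw [pvTokenize, dif_pos hb, pvR_single]
  | case2 dep res b hb result1 remaining e he =>
    replace hb : ¬ PySem.Chars.find dep ['$', '{'] = -1 := hb
    replace he : PySem.Chars.find
        (PySem.List.slice dep (some (PySem.Chars.find dep ['$', '{'] + 2)) none) ['}'] = -1 := he
    rw [pvTokenize, dif_neg hb, dif_pos he, pvR_single]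
    have hb0 : 0 ≤ PySem.Chars.find dep ['$', '{'] := by
      have := PySem.Chars.neg_one_le_find dep ['$', '{']; omega
    have hsplit : pvTr dep
        = pvTr (PySem.List.slice dep none (some (PySem.Chars.find dep ['$', '{'])))
          ++ pvTr (PySem.List.slice dep (some (PySem.Chars.find dep ['$', '{'])) none) := by
      rw [← pvTr_append, pvSlice_split _ _ hb0]
    rw [hsplit]
    simp [result1, b, List.append_assoc]
  | case3 dep res b hb result1 remaining e he ih =>
    replace hb : ¬ PySem.Chars.find dep ['$', '{'] = -1 := hb
    replace he : ¬ PySem.Chars.find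
        (PySem.List.slice dep (some (PySem.Chars.find dep ['$', '{'] + 2)) none) ['}'] = -1 := he
    rw [ih]
    conv_rhs => rw [pvTokenize]
    rw [dif_neg hb, dif_neg he, pvR_cons2]
    simp [result1, remaining, e, b, List.append_assoc]

-- ===== VERDICT (by name: the statement is the Claim_ definition above) =====
theorem convert_dep_except_oe_vars_spec : Claim_equal_convert_dep_except_oe_vars := by
  intro dep _
  show _ = _
  unfold convert_dep_except_oe_vars convert_dep_except_oe_vars_alt
  rw [pvLoopA_eq]
  rfl
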